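-- pv_equiv track=rewrite | github.com/1TBhard/Algorithm | programers/파이썬/test/t2.py | solution
-- ===== SOURCE A (Python) =====
-- def solution(n):
--
--     b = bin(n)
--     b = (str(b)[2:])
--
--     result = 0
--     n = len(b)
--     for item in b:
--         if item == "1":
--             result += 3 ** (len(b)-n+2)
--         n -= 1
--
--     return result
-- ===== SOURCE B (Python) =====
-- def solution(n):
--     b = bin(n)[2:]
--     result = 0
--     for c in reversed(b):
--         result = result * 3 + (9 if c == "1" else 0)
--     return result
-- ===== Notes on version B (the rewrite author's own statement) =====
-- stated objective: simpler
-- what changed: B replaces A's per-character power computation 3**(index+2) with a single Horner evaluation base 3 over the reversed binary string (result = result*3 + 9 per set bit), removing the length/counter bookkeeping and the exponentiation.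
import Mathlib
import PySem

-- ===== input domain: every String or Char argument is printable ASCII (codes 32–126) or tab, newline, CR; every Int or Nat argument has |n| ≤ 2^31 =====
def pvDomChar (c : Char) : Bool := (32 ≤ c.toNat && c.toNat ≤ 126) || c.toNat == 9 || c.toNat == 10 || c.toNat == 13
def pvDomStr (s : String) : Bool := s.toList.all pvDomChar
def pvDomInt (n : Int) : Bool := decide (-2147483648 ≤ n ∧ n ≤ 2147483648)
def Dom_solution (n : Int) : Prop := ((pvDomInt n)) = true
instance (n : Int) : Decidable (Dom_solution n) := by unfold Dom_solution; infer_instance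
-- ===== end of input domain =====

-- B evaluates the same stripped binary string by Horner's method base 3 (LSB first),
-- instead of A's counter-driven loop adding 3^(index+2) per '1'.  Return values only;
-- A rebinds its parameter locally, no observable mutation.

-- ===== PORT A =====
-- bin(m) for m > 0, as the list of binary digit characters, MSB first (shared by both ports)
def pvBits : Nat → List Char
  | 0 => []
  | (m+1) => pvBits ((m+1) / 2) ++ [if (m+1) % 2 = 1 then '1' else '0']

-- bin(n)[2:] : for n < 0 Python gives '-0b…'[2:] = 'b' followed by the digits of -n
def pvBinStripped (n : Int) : List Char :=
  if n < 0 then 'b' :: pvBits (-n).toNat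
  else if n = 0 then ['0']
  else pvBits n.toNat

def solution (n : Int) : Int :=
  let b := pvBinStripped n
  let L := b.length
  -- result, n := 0, len(b); for item in b: if item == "1": result += 3**(len(b)-n+2); n -= 1
  (b.foldl (fun (p : Int × Nat) item =>
      (if item = '1' then p.1 + (3:Int) ^ (L - p.2 + 2) else p.1, p.2 - 1)) (0, L)).1

-- ===== PORT B =====
def solution_alt (n : Int) : Int :=
  let b := pvBinStripped n
  -- result = 0; for c in reversed(b): result = result*3 + (9 if c == "1" else 0)
  b.reverse.foldl (fun result c => result * 3 + (if c = '1' then (9:Int) else 0)) 0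

-- ===== PRECONDITION & SPEC =====
def Spec_solution (n : Int) (out : Int) : Prop := out = solution_alt n
instance (n : Int) (out : Int) : Decidable (Spec_solution n out) := by unfold Spec_solution; infer_instance

-- ===== CLAIM (what is proved, stated in full; the proofs are below) =====
def Claim_equal_solution : Prop := ∀ (n : Int), Dom_solution n → Spec_solution n (solution n)

-- ===== LEMMAS AND PROOFS =====

-- Horner value of a digit string, MSB first: H (c::t) = 3 * H t + (9 if c='1').
def pvH (l : List Char) : Int :=
  l.foldr (fun c r => r * 3 + (if c = '1' then (9:Int) else 0)) 0

lemma pvLoopA (L : Nat) (l : List Char) : ∀ (r : Int) (m : Nat), l.length ≤ m → m ≤ L →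
    (l.foldl (fun (p : Int × Nat) item =>
        (if item = '1' then p.1 + (3:Int) ^ (L - p.2 + 2) else p.1, p.2 - 1)) (r, m)).1
      = r + (3:Int) ^ (L - m) * pvH l := by
  induction l with
  | nil => intro r m _ _; simp [pvH]
  | cons c t ih =>
    intro r m hlen hm
    have h1 : 1 ≤ m := by simp at hlen; omega
    have e1 : L - (m - 1) = (L - m) + 1 := by omega
    have e2 : L - m + 2 = (L - m) + 2 := rfl
    simp only [List.foldl_cons]
    rw [ih _ (m - 1) (by simp at hlen; omega) (by omega)]
    simp only [pvH, List.foldr_cons, e1]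
    by_cases hc : c = '1' <;> simp [hc, pow_succ] <;> ring

theorem solution_eq_H (n : Int) : solution n = pvH (pvBinStripped n) := by
  unfold solution
  have := pvLoopA (pvBinStripped n).length (pvBinStripped n) 0 (pvBinStripped n).length
    (le_refl _) (le_refl _)
  simpa using this

theorem solution_alt_eq_H (n : Int) : solution_alt n = pvH (pvBinStripped n) := by
  unfold solution_alt pvH
  rw [List.foldl_reverse]

-- ===== VERDICT (by name: the statement is the Claim_ definition above) =====
theorem solution_spec : Claim_equal_solution := by
  intro n _
  unfold Spec_solution
  rw [solution_eq_H, solution_alt_eq_H]
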